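-- pv_equiv track=rewrite | github.com/rexrex9/SVD_ALS_recommendation_system | LFM_by_pytorch.py | __getParis
-- ===== SOURCE A (Python) =====
-- def __getParis(n_users,n_items,dataset):
--     ndataset=[]
--     for data in dataset:
--         u,i,r=data.strip().split()
--         u,i,r=int(u),int(i),int(r)
--         if u>n_users:n_users=u
--         if i>n_items:n_items=i
--         ndataset.append([u,i,r])
--     return ndataset,n_users,n_items
-- ===== SOURCE B (Python) =====
-- def __getParis(n_users, n_items, dataset):
--     def _row(line):
--         u, i, r = line.strip().split()
--         return [int(u), int(i), int(r)]
--     ndataset = [_row(line) for line in dataset]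
--     n_users = max([n_users] + [row[0] for row in ndataset])
--     n_items = max([n_items] + [row[1] for row in ndataset])
--     return ndataset, n_users, n_items
-- ===== Notes on version B (the rewrite author's own statement) =====
-- stated objective: simpler
-- what changed: Replaces the fused single-pass loop that interleaves parsing with running-max bookkeeping by a parse-only comprehension followed by two independent max() reductions over the parsed columns, seeded with the incoming n_users/n_items.
import Mathlib
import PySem

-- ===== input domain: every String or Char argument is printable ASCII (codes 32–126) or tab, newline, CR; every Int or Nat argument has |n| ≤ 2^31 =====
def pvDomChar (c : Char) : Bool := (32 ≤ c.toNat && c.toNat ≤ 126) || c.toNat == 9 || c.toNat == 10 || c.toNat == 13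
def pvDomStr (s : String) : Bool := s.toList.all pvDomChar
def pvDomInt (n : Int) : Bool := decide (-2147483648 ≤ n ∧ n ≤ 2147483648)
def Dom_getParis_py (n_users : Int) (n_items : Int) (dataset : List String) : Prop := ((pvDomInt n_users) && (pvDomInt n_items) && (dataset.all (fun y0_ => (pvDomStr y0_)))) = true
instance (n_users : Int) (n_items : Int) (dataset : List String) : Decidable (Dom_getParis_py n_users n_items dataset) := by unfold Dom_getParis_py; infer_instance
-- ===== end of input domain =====

-- B replaces the fused parse+running-max loop by a parse-only pass followed by two max() reductions over the columns (objective: simpler).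


-- ===== PORT A =====
-- u,i,r = data.strip().split(); int(u),int(i),int(r): some (u,i,r) iff the line yields exactly three int tokens
def pvParseA (s : String) : Option (Int × Int × Int) :=
  match PySem.Str.split₀ (PySem.Str.strip s) with
  | [u, i, r] =>
    match PySem.Int.ofStr? u, PySem.Int.ofStr? i, PySem.Int.ofStr? r with
    | some u, some i, some r => some (u, i, r)
    | _, _, _ => none
  | _ => none

def getParis_py (n_users : Int) (n_items : Int) (dataset : List String) : List (List Int) × Int × Int :=
  dataset.foldl (fun st data =>
    match pvParseA data with
    | some (u, i, r) =>
      (st.1 ++ [[u, i, r]],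
       if u > st.2.1 then u else st.2.1,
       if i > st.2.2 then i else st.2.2)
    | none => st)  -- unreachable under Pre_ (Python raises here)
    (([] : List (List Int)), n_users, n_items)

-- ===== PORT B =====
-- _row(line): u,i,r = line.strip().split(); [int(u),int(i),int(r)]
def pvRowB (s : String) : List Int :=
  match PySem.Str.split₀ (PySem.Str.strip s) with
  | [u, i, r] => [(PySem.Int.ofStr? u).getD 0, (PySem.Int.ofStr? i).getD 0, (PySem.Int.ofStr? r).getD 0]
  | _ => []  -- unreachable under Pre_ (Python raises here)

def getParis_py_alt (n_users : Int) (n_items : Int) (dataset : List String) : List (List Int) × Int × Int :=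
  let ndataset := dataset.map pvRowB
  let n_users' := (PySem.List.max? (n_users :: ndataset.map (fun row => PySem.List.pyGetD row 0 0)) (fun y => y)).getD n_users
  let n_items' := (PySem.List.max? (n_items :: ndataset.map (fun row => PySem.List.pyGetD row 1 0)) (fun y => y)).getD n_items
  (ndataset, n_users', n_items')

-- ===== PRECONDITION & SPEC =====
-- Pre_ excludes lines on which Python A raises (unpacking a split that is not exactly 3 tokens, or int() on a non-integer token).
def pvLineOk (s : String) : Bool :=
  match (PySem.Str.split₀ (PySem.Str.strip s)).map PySem.Int.ofStr? with
  | [some _, some _, some _] => true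
  | _ => false

def Pre_getParis_py (n_users : Int) (n_items : Int) (dataset : List String) : Prop :=
  dataset.all pvLineOk = true
instance (n_users : Int) (n_items : Int) (dataset : List String) : Decidable (Pre_getParis_py n_users n_items dataset) := by unfold Pre_getParis_py; infer_instance

def pvWitness_getParis_py : Int × Int × List String := (0, 0, ["1 2 3", " 4\t5 6 "])

def Spec_getParis_py (n_users : Int) (n_items : Int) (dataset : List String) (out : List (List Int) × Int × Int) : Prop := out = getParis_py_alt n_users n_items dataset
instance (n_users : Int) (n_items : Int) (dataset : List String) (out : List (List Int) × Int × Int) : Decidable (Spec_getParis_py n_users n_items dataset out) := by unfold Spec_getParis_py; infer_instance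

-- ===== CLAIM (what is proved, stated in full; the proofs are below) =====
def Claim_equal_getParis_py : Prop := ∀ (n_users : Int) (n_items : Int) (dataset : List String), Dom_getParis_py n_users n_items dataset → Pre_getParis_py n_users n_items dataset → Spec_getParis_py n_users n_items dataset (getParis_py n_users n_items dataset)

-- ===== LEMMAS AND PROOFS =====

theorem pvLineOk_parseA {s : String} (h : pvLineOk s = true) :
    ∃ u i r, pvParseA s = some (u, i, r) := by
  unfold pvLineOk at h
  unfold pvParseA
  rcases hts : PySem.Str.split₀ (PySem.Str.strip s) with _ | ⟨a, _ | ⟨b, _ | ⟨c, _ | _⟩⟩⟩ <;>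
    simp [hts] at h ⊢ <;> try exact h.elim
  · rcases ha : PySem.Int.ofStr? a with _ | u <;>
    rcases hb : PySem.Int.ofStr? b with _ | i <;>
    rcases hc : PySem.Int.ofStr? c with _ | r <;>
      simp [ha, hb, hc] at h ⊢

theorem pvRowB_of_parseA {s : String} {u i r : Int} (h : pvParseA s = some (u, i, r)) :
    pvRowB s = [u, i, r] := by
  unfold pvParseA at h
  unfold pvRowB
  rcases hts : PySem.Str.split₀ (PySem.Str.strip s) with _ | ⟨a, _ | ⟨b, _ | ⟨c, _ | _⟩⟩⟩ <;>
    simp [hts] at h ⊢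
  rcases ha : PySem.Int.ofStr? a with _ | u' <;>
  rcases hb : PySem.Int.ofStr? b with _ | i' <;>
  rcases hc : PySem.Int.ofStr? c with _ | r' <;>
    simp [ha, hb, hc] at h ⊢
  exact ⟨h.1, h.2.1, h.2.2⟩

-- the fused loop of A equals: append the parsed rows, running max of column 0 / column 1
theorem pvFoldA (dataset : List String) (h : ∀ s ∈ dataset, pvLineOk s = true)
    (acc : List (List Int)) (nu ni : Int) :
    dataset.foldl (fun st data =>
      match pvParseA data with
      | some (u, i, r) =>
        (st.1 ++ [[u, i, r]],
         if u > st.2.1 then u else st.2.1,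
         if i > st.2.2 then i else st.2.2)
      | none => st) (acc, nu, ni) =
    (acc ++ dataset.map pvRowB,
     (dataset.map (fun s => PySem.List.pyGetD (pvRowB s) 0 0)).foldl max nu,
     (dataset.map (fun s => PySem.List.pyGetD (pvRowB s) 1 0)).foldl max ni) := by
  induction dataset generalizing acc nu ni with
  | nil => simp
  | cons s t ih =>
    obtain ⟨u, i, r, hp⟩ := pvLineOk_parseA (h s (by simp))
    have hrow := pvRowB_of_parseA hp
    simp only [List.foldl_cons, List.map_cons, hp, hrow]
    rw [ih (fun x hx => h x (by simp [hx]))]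
    have h1 : (if u > nu then u else nu) = max nu u := by omega
    have h2 : (if i > ni then i else ni) = max ni i := by omega
    simp [h1, h2, PySem.List.pyGetD_ofNat']

-- ===== VERDICT (by name: the statement is the Claim_ definition above) =====
theorem getParis_py_spec : Claim_equal_getParis_py := by
  intro n_users n_items dataset _ hpre
  unfold Spec_getParis_py getParis_py getParis_py_alt
  rw [pvFoldA dataset (by simpa [Pre_getParis_py, List.all_eq_true] using hpre)]
  simp [PySem.List.max?_id_cons, Function.comp_def]
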